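-- pv_equiv track=rewrite | github.com/samratabduljalil/Hill-Climbing | hill_clumbing.py | state_generation
-- ===== SOURCE A (Python) =====
-- def calc_cost(state):
--   a=len(state)
--
--   add=0;
--   for i in range(0,a):
--     for j in range(i+1,a):
--       if state[i]>state[j]:
--         add+=1
--
--   return add
--
-- def state_generation(current_state,current_state_cost):
--   ab=len(current_state)
--
--
--   temp=[]
--   temp1=[]
--
--   for k in current_state:
--     temp.append(k)
--
--   for k in current_state:
--     temp1.append(k)
--   min_cost=99999
--   for i in range(0,ab):
--
--     for j in range(i+1,ab):
--       l=0
--       for k in current_state: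
--           temp[l]=k
--           l+=1
--
--       g=temp[j]
--       temp[j]=temp[i]
--       temp[i]=g
--
--
--       e=calc_cost(temp)
--
--
--       if(e<min_cost):
--         min_cost=e
--         l=0
--         for k in temp:
--           temp1[l]=k
--           l+=1
--
--
--
--
--
--   if min_cost < current_state_cost:
--
--     return temp1,min_cost
--   else:
--
--     return current_state,None
-- ===== SOURCE B (Python) =====
-- def state_generation(current_state, current_state_cost):
--     s = current_state
--     n = len(s)
--     # base inversion count of s, computed once
--     base = 0
--     for i in range(n):
--         x = s[i]
--         for y in s[i + 1:]:
--             if x > y: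
--                 base += 1
--     # for each swap (i, j) compute its cost as base + delta in O(j - i)
--     min_cost = 99999
--     best = list(s)
--     for i in range(n):
--         x = s[i]
--         for j in range(i + 1, n):
--             y = s[j]
--             d = (1 if y > x else 0) - (1 if x > y else 0)
--             for z in s[i + 1:j]:
--                 d += (1 if y > z else 0) - (1 if x > z else 0)
--                 d += (1 if z > x else 0) - (1 if z > y else 0)
--             c = base + d
--             if c < min_cost:
--                 min_cost = c
--                 best = list(s)
--                 best[i], best[j] = y, x
--     if min_cost < current_state_cost:
--         return best, min_cost
--     return current_state, None
-- ===== Notes on version B (the rewrite author's own statement) =====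
-- stated objective: faster
-- what changed: B computes the inversion count of the input once and evaluates each candidate swap (i,j) by an incremental O(j-i) delta over the elements between i and j, instead of A's full O(n^2) inversion recount of a freshly rebuilt copy for every pair.
import Mathlib
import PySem

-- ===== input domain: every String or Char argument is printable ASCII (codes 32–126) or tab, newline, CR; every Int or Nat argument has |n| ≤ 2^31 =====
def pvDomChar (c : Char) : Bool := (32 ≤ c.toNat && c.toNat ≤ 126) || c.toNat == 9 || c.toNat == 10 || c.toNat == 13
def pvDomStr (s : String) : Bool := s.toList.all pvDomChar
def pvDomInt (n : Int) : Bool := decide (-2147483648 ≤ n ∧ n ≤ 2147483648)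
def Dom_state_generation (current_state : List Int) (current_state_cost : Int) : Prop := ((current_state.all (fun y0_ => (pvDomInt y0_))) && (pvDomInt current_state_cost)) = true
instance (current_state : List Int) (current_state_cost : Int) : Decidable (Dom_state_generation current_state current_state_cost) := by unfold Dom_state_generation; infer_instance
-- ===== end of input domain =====

-- B computes the base inversion count once and each swap's cost as base + an O(j-i) delta
-- (O(n^3) instead of A's recount-per-swap O(n^4)); return values proved identical.


-- ===== PORT A =====
def calc_cost (state : List Int) : Int :=
  let a := PySem.List.len state
  (PySem.List.pyRange 0 a).foldl (fun add i =>
    (PySem.List.pyRange (i+1) a).foldl (fun add j =>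
      if PySem.List.pyGetD state i 0 > PySem.List.pyGetD state j 0 then add + 1 else add) add) 0

def state_generation (current_state : List Int) (current_state_cost : Int) : List Int × Option Int :=
  let ab := PySem.List.len current_state
  let temp := current_state.foldl (fun t k => t ++ [k]) ([] : List Int)
  let temp1 := current_state.foldl (fun t k => t ++ [k]) ([] : List Int)
  let st := (PySem.List.pyRange 0 ab).foldl (fun st i =>
    (PySem.List.pyRange (i+1) ab).foldl (fun st j =>
      let temp := st.1
      let temp1 := st.2.1
      let min_cost := st.2.2
      -- l = 0; for k in current_state: temp[l] = k; l += 1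
      let temp := (current_state.foldl
        (fun (p : List Int × Int) k => (PySem.List.pySetD p.1 p.2 k, p.2 + 1)) (temp, 0)).1
      let g := PySem.List.pyGetD temp j 0
      let temp := PySem.List.pySetD temp j (PySem.List.pyGetD temp i 0)
      let temp := PySem.List.pySetD temp i g
      let e := calc_cost temp
      if e < min_cost then
        -- l = 0; for k in temp: temp1[l] = k; l += 1
        (temp, (temp.foldl
          (fun (p : List Int × Int) k => (PySem.List.pySetD p.1 p.2 k, p.2 + 1)) (temp1, 0)).1, e)
      else (temp, temp1, min_cost)) st) (temp, temp1, (99999 : Int))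
  if st.2.2 < current_state_cost then (st.2.1, some st.2.2) else (current_state, none)

-- ===== PORT B =====
def state_generation_alt (current_state : List Int) (current_state_cost : Int) : List Int × Option Int :=
  let s := current_state
  let n := PySem.List.len s
  let base := (PySem.List.pyRange 0 n).foldl (fun base i =>
    let x := PySem.List.pyGetD s i 0
    (PySem.List.slice s (some (i+1)) none).foldl
      (fun base y => if x > y then base + 1 else base) base) 0
  let st := (PySem.List.pyRange 0 n).foldl (fun st i =>
    let x := PySem.List.pyGetD s i 0
    (PySem.List.pyRange (i+1) n).foldl (fun st j =>
      let min_cost := st.1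
      let best := st.2
      let y := PySem.List.pyGetD s j 0
      let d := (if y > x then (1:Int) else 0) - (if x > y then (1:Int) else 0)
      let d := (PySem.List.slice s (some (i+1)) (some j)).foldl (fun d z =>
        let d := d + ((if y > z then (1:Int) else 0) - (if x > z then (1:Int) else 0))
        d + ((if z > x then (1:Int) else 0) - (if z > y then (1:Int) else 0))) d
      let c := base + d
      if c < min_cost then
        (c, PySem.List.pySetD (PySem.List.pySetD s i y) j x)
      else (min_cost, best)) st) ((99999 : Int), s)
  if st.1 < current_state_cost then (st.2, some st.1) else (current_state, none)

-- ===== PRECONDITION & SPEC =====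
def Spec_state_generation (current_state : List Int) (current_state_cost : Int) (out : List Int × Option Int) : Prop := out = state_generation_alt current_state current_state_cost
instance (current_state : List Int) (current_state_cost : Int) (out : List Int × Option Int) : Decidable (Spec_state_generation current_state current_state_cost out) := by unfold Spec_state_generation; infer_instance

-- ===== CLAIM (what is proved, stated in full; the proofs are below) =====
def Claim_equal_state_generation : Prop := ∀ (current_state : List Int) (current_state_cost : Int), Dom_state_generation current_state current_state_cost → Spec_state_generation current_state current_state_cost (state_generation current_state current_state_cost)

-- ===== LEMMAS AND PROOFS =====

-- number of elements of l smaller than x (as Int)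
def cntGT (x : Int) (l : List Int) : Int := (l.countP (fun z => decide (x > z)) : Int)
-- number of elements of l greater than x (as Int)
def cntLT (x : Int) (l : List Int) : Int := (l.countP (fun z => decide (z > x)) : Int)

-- inversion count of a list
def inv : List Int → Int
  | [] => 0
  | x :: xs => cntGT x xs + inv xs

-- number of inversions between a left block p and a right block q
def cross (p q : List Int) : Int := (p.map (fun a => cntGT a q)).sum

-- relation carried through the pair loops: A's (temp, temp1, min_cost) vs B's (min_cost, best)
def StRel (s : List Int) (stA : List Int × List Int × Int) (stB : Int × List Int) : Prop :=
  stA.1.length = s.length ∧ stA.2.1.length = s.length ∧ stA.2.1 = stB.2 ∧ stA.2.2 = stB.1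

theorem cntGT_cons (x b : Int) (q : List Int) :
    cntGT x (b :: q) = (if x > b then 1 else 0) + cntGT x q := by
  simp [cntGT, List.countP_cons]; split_ifs <;> omega

theorem cntLT_cons (x b : Int) (q : List Int) :
    cntLT x (b :: q) = (if b > x then 1 else 0) + cntLT x q := by
  simp [cntLT, List.countP_cons]; split_ifs <;> omega

theorem cntGT_append (x : Int) (p q : List Int) : cntGT x (p ++ q) = cntGT x p + cntGT x q := by
  simp [cntGT, List.countP_append]

theorem cntGT_perm (x : Int) {q q' : List Int} (h : q.Perm q') : cntGT x q = cntGT x q' := by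
  simp [cntGT, h.countP_eq]

theorem cross_perm (p : List Int) {q q' : List Int} (h : q.Perm q') : cross p q = cross p q' := by
  simp only [cross]; congr 1; exact List.map_congr_left (fun a _ => cntGT_perm a h)

theorem cross_cons_right (p : List Int) (b : Int) (q : List Int) :
    cross p (b :: q) = cntLT b p + cross p q := by
  induction p with
  | nil => simp [cross, cntLT]
  | cons a p ih =>
    simp only [cross, List.map_cons, List.sum_cons] at *
    rw [cntGT_cons, ih, cntLT_cons]; ring

theorem inv_append (p q : List Int) : inv (p ++ q) = inv p + inv q + cross p q := by
  induction p with
  | nil => simp [inv, cross]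
  | cons a p ih =>
    simp only [List.cons_append, inv, cross, List.map_cons, List.sum_cons] at *
    rw [ih, cntGT_append]; ring

-- the effect on the inversion count of swapping the two marked elements
theorem inv_swap (u v w : List Int) (x y : Int) :
    inv (u ++ (y :: (v ++ (x :: w)))) =
      inv (u ++ (x :: (v ++ (y :: w)))) +
        (((if y > x then (1:Int) else 0) - (if x > y then 1 else 0)) +
          ((cntGT y v - cntGT x v) + (cntLT x v - cntLT y v))) := by
  have h1 : (x :: (v ++ (y :: w))).Perm (y :: (v ++ (x :: w))) := by
    refine (List.Perm.cons x List.perm_middle).trans ?_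
    refine (List.Perm.swap y x (v ++ w)).trans ?_
    exact List.Perm.cons y List.perm_middle.symm
  rw [inv_append, inv_append, cross_perm u h1]
  have e1 : inv (y :: (v ++ (x :: w))) = cntGT y v + ((if y > x then (1:Int) else 0) + cntGT y w)
      + (inv v + (cntGT x w + inv w) + (cntLT x v + cross v w)) := by
    rw [show inv (y :: (v ++ (x :: w))) = cntGT y (v ++ (x :: w)) + inv (v ++ (x :: w)) from rfl,
      cntGT_append, cntGT_cons, inv_append, cross_cons_right,
      show inv (x :: w) = cntGT x w + inv w from rfl]
  have e2 : inv (x :: (v ++ (y :: w))) = cntGT x v + ((if x > y then (1:Int) else 0) + cntGT x w)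
      + (inv v + (cntGT y w + inv w) + (cntLT y v + cross v w)) := by
    rw [show inv (x :: (v ++ (y :: w))) = cntGT x (v ++ (y :: w)) + inv (v ++ (y :: w)) from rfl,
      cntGT_append, cntGT_cons, inv_append, cross_cons_right,
      show inv (y :: w) = cntGT y w + inv w from rfl]
  rw [e1, e2]; ring

-- B's inner delta fold computes the closed delta
theorem dfold_eq (x y : Int) (v : List Int) (d0 : Int) :
    v.foldl (fun d z =>
        (d + ((if y > z then (1:Int) else 0) - (if x > z then (1:Int) else 0))) +
          ((if z > x then (1:Int) else 0) - (if z > y then (1:Int) else 0))) d0 =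
      d0 + ((cntGT y v - cntGT x v) + (cntLT x v - cntLT y v)) := by
  induction v generalizing d0 with
  | nil => simp [cntGT, cntLT]
  | cons z v ih =>
    simp only [List.foldl_cons]
    rw [ih, cntGT_cons, cntGT_cons, cntLT_cons, cntLT_cons]
    ring

-- copy loop: assigning s elementwise into a same-length buffer yields s
theorem copy_into (s : List Int) : ∀ (t : List Int) (l : Nat), l + s.length = t.length →
    (s.foldl (fun (p : List Int × Int) k => (PySem.List.pySetD p.1 p.2 k, p.2 + 1)) (t, (l : Int))).1
      = t.take l ++ s := by
  induction s with
  | nil => intro t l h; simp at h; simp [List.take_of_length_le (le_of_eq h.symm)]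
  | cons k s ih =>
    intro t l h
    simp only [List.foldl_cons, PySem.List.pySetD_natCast]
    have hl : l < t.length := by simp at h; omega
    have hcast : (l : Int) + 1 = ((l + 1 : Nat) : Int) := by push_cast; ring
    rw [hcast, ih (t.set l k) (l+1) (by simp at h ⊢; omega)]
    have : (t.set l k).take (l+1) = t.take l ++ [k] := by
      rw [List.set_eq_take_append_cons_drop, if_pos hl, List.take_append]
      have h1 : ((t.take l).take (l+1)) = t.take l := List.take_of_length_le (by simp)
      rw [h1]
      simp [List.length_take, Nat.min_eq_left hl.le]
    rw [this]; simp

theorem copy_into_zero (s t : List Int) (h : t.length = s.length) :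
    (s.foldl (fun (p : List Int × Int) k => (PySem.List.pySetD p.1 p.2 k, p.2 + 1)) (t, 0)).1 = s := by
  have := copy_into s t 0 (by omega)
  simpa using this

-- counting loop over a suffix, shared by calc_cost and B's base computation
theorem outer_sum (s : List Int) : ∀ (m a : Nat) (acc : Int), s.length - a = m →
    (PySem.List.pyRange (a : Int) (s.length : Int)).foldl
        (fun add i => add + cntGT (PySem.List.pyGetD s i 0) (s.drop (i.toNat + 1))) acc
      = acc + inv (s.drop a) := by
  intro m
  induction m with
  | zero =>
    intro a acc h
    have hle : s.length ≤ a := by omega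
    rw [PySem.List.pyRange_one_eq_nil (by exact_mod_cast hle)]
    simp [List.drop_eq_nil_of_le hle, inv]
  | succ m ih =>
    intro a acc h
    have ha : a < s.length := by omega
    rw [PySem.List.pyRange_one_cons (by exact_mod_cast ha)]
    simp only [List.foldl_cons]
    have hcast : (a : Int) + 1 = ((a + 1 : Nat) : Int) := by push_cast; ring
    rw [hcast, ih (a+1) _ (by omega)]
    have hget : PySem.List.pyGetD s ((a:Nat) : Int) 0 = s[a] := by
      rw [PySem.List.pyGetD_eq_getElem s 0 (by omega) (by exact_mod_cast ha)]
      simp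
    rw [hget, List.drop_eq_getElem_cons ha]
    simp only [inv, Int.toNat_natCast]
    ring

-- one count of later-smaller elements, as A's and B's inner loops both compute it
theorem inner_count (x : Int) (l : List Int) (acc : Int) :
    l.foldl (fun add y => if x > y then add + 1 else add) acc = acc + cntGT x l := by
  have := PySem.List.foldl_count_if (fun z => decide (x > z)) l acc
  simpa [cntGT] using this

theorem calc_cost_eq_inv (s : List Int) : calc_cost s = inv s := by
  unfold calc_cost
  simp only []
  have hcg := PySem.List.foldl_congr_mem (PySem.List.pyRange 0 (PySem.List.len s))
    (fun add i => (PySem.List.pyRange (i+1) (PySem.List.len s)).foldl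
      (fun add j => if PySem.List.pyGetD s i 0 > PySem.List.pyGetD s j 0 then add + 1 else add) add)
    (fun add i => add + cntGT (PySem.List.pyGetD s i 0) (s.drop (i.toNat + 1))) 0 ?_
  · rw [hcg]
    have h3 := outer_sum s s.length 0 0 rfl
    simpa [PySem.List.len_eq] using h3
  · intro acc i hi
    beta_reduce
    rw [PySem.List.mem_pyRange_one] at hi
    have h2 := PySem.List.foldl_pyRange_pyGetD s 0
      (fun add y => if PySem.List.pyGetD s i 0 > y then add + 1 else add) acc
      (show (0:Int) ≤ i + 1 by omega)
    simp only [] at h2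
    rw [h2, inner_count]
    have ht : (i+1).toNat = i.toNat + 1 := by omega
    rw [ht]

-- B's base computation equals the inversion count
theorem base_eq_inv (s : List Int) :
    (PySem.List.pyRange 0 (PySem.List.len s)).foldl (fun base i =>
      (PySem.List.slice s (some (i+1)) none).foldl
        (fun base y => if PySem.List.pyGetD s i 0 > y then base + 1 else base) base) 0 = inv s := by
  have hcg := PySem.List.foldl_congr_mem (PySem.List.pyRange 0 (PySem.List.len s))
    (fun base i => (PySem.List.slice s (some (i+1)) none).foldl
        (fun base y => if PySem.List.pyGetD s i 0 > y then base + 1 else base) base)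
    (fun add i => add + cntGT (PySem.List.pyGetD s i 0) (s.drop (i.toNat + 1))) 0 ?_
  · rw [hcg]
    have h3 := outer_sum s s.length 0 0 rfl
    simpa [PySem.List.len_eq] using h3
  · intro acc i hi
    beta_reduce
    rw [PySem.List.mem_pyRange_one] at hi
    rw [PySem.List.slice_from s (show (0:Int) ≤ i + 1 by omega), inner_count]
    have ht : (i+1).toNat = i.toNat + 1 := by omega
    rw [ht]

theorem set_mid (u w : List Int) (z c : Int) : (u ++ z :: w).set u.length c = u ++ c :: w := by
  simp

theorem decomp (s : List Int) (a b : Nat) (hab : a < b) (hb : b < s.length) :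
    s = s.take a ++ (s[a]'(by omega) ::
      ((s.drop (a+1)).take (b - (a+1)) ++ (s[b] :: s.drop (b+1)))) := by
  conv_lhs => rw [← List.take_append_drop a s, List.drop_eq_getElem_cons (by omega : a < s.length)]
  congr 1
  congr 1
  conv_lhs => rw [← List.take_append_drop (b - (a+1)) (s.drop (a+1))]
  congr 1
  rw [List.drop_drop, show a + 1 + (b - (a+1)) = b from by omega]
  exact List.drop_eq_getElem_cons hb

theorem set_swap_decomp (u v w : List Int) (x0 y0 x y : Int) :
    ((u ++ (x0 :: (v ++ (y0 :: w)))).set (u.length + (v.length + 1)) x).set u.length y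
      = u ++ (y :: (v ++ (x :: w))) := by
  rw [show u ++ (x0 :: (v ++ (y0 :: w))) = (u ++ x0 :: v) ++ y0 :: w from by simp,
    show u.length + (v.length + 1) = (u ++ x0 :: v).length from by simp,
    set_mid,
    show (u ++ x0 :: v) ++ x :: w = u ++ x0 :: (v ++ x :: w) from by simp,
    set_mid]

-- the swapped list, decomposed around positions a < b
theorem swap_decomp (s : List Int) (a b : Nat) (hab : a < b) (hb : b < s.length) (x y : Int) :
    (s.set b x).set a y =
      s.take a ++ (y :: ((s.drop (a+1)).take (b - (a+1)) ++ (x :: s.drop (b+1)))) := by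
  conv_lhs => rw [decomp s a b hab hb]
  have h := set_swap_decomp (s.take a) ((s.drop (a+1)).take (b - (a+1))) (s.drop (b+1))
    (s[a]'(by omega)) (s[b]'hb) x y
  have hul : (s.take a).length = a := by simp; omega
  have hvl : ((s.drop (a+1)).take (b - (a+1))).length = b - (a+1) := by simp; omega
  rw [hul, hvl, show a + (b - (a+1) + 1) = b from by omega] at h
  exact h

theorem final_if (s : List Int) (cost : Int) (stA : List Int × List Int × Int) (stB : Int × List Int)
    (h : StRel s stA stB) :
    (if stA.2.2 < cost then (stA.2.1, some stA.2.2) else (s, (none : Option Int)))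
      = (if stB.1 < cost then (stB.2, some stB.1) else (s, none)) := by
  rw [h.2.2.1, h.2.2.2]

theorem foldl_rel {α β γ : Type} (R : α → β → Prop) (f : α → γ → α) (g : β → γ → β) :
    ∀ (l : List γ) (a : α) (b : β), (∀ a' b' c, c ∈ l → R a' b' → R (f a' c) (g b' c)) →
      R a b → R (l.foldl f a) (l.foldl g b) := by
  intro l
  induction l with
  | nil => intro a b _ h; exact h
  | cons c l ih =>
    intro a b hstep h
    exact ih _ _ (fun a' b' c' hc' => hstep a' b' c' (List.mem_cons_of_mem _ hc'))
      (hstep a b c (List.mem_cons_self) h)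

-- ===== VERDICT (by name: the statement is the Claim_ definition above) =====
theorem state_generation_spec : Claim_equal_state_generation := by
  unfold Claim_equal_state_generation Spec_state_generation
  intro s cost _dom
  unfold state_generation state_generation_alt
  simp only [base_eq_inv s]
  have hcopy0 : s.foldl (fun t k => t ++ [k]) ([] : List Int) = s := by
    simpa using PySem.List.foldl_append_singleton s []
  rw [hcopy0]
  refine final_if s cost _ _ ?_
  refine foldl_rel (StRel s) _ _ _ _ _ ?_ ⟨rfl, rfl, rfl, rfl⟩
  intro stA stB i hi hR
  rw [PySem.List.mem_pyRange_one] at hi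
  refine foldl_rel (StRel s) _ _ _ _ _ ?_ hR
  intro stA' stB' j hj hR'
  rw [PySem.List.mem_pyRange_one] at hj
  simp only [PySem.List.len_eq] at hi hj
  obtain ⟨hlen1, hlen2, hbb, hmm⟩ := hR'
  have h0i : 0 ≤ i := hi.1
  have h0j : 0 ≤ j := by omega
  have hab : i.toNat < j.toNat := by omega
  have hbs : j.toNat < s.length := by omega
  rw [copy_into_zero s stA'.1 hlen1]
  rw [PySem.List.pyGetD_eq_getElem s 0 h0i (by omega), PySem.List.pyGetD_eq_getElem s 0 h0j (by omega)]
  rw [PySem.List.pySetD_of_nonneg s _ h0j, PySem.List.pySetD_of_nonneg _ _ h0i,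
    PySem.List.pySetD_of_nonneg s _ h0i, PySem.List.pySetD_of_nonneg _ _ h0j]
  rw [List.set_comm _ _ (show i.toNat ≠ j.toNat by omega)]
  rw [PySem.List.slice_toNat s (show (0:Int) ≤ i + 1 by omega) h0j,
    show (i+1).toNat = i.toNat + 1 from by omega]
  rw [swap_decomp s i.toNat j.toNat hab hbs]
  rw [dfold_eq]
  have hc1 : calc_cost (s.take i.toNat ++ (s[j.toNat] ::
      ((s.drop (i.toNat+1)).take (j.toNat - (i.toNat+1)) ++ (s[i.toNat]'(by omega) :: s.drop (j.toNat+1)))))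
      = inv s +
        (((if s[j.toNat]'hbs > s[i.toNat]'(by omega) then (1:Int) else 0) -
            (if s[i.toNat]'(by omega) > s[j.toNat]'hbs then 1 else 0)) +
          ((cntGT s[j.toNat] ((s.drop (i.toNat+1)).take (j.toNat - (i.toNat+1)))
              - cntGT s[i.toNat] ((s.drop (i.toNat+1)).take (j.toNat - (i.toNat+1)))) +
            (cntLT s[i.toNat] ((s.drop (i.toNat+1)).take (j.toNat - (i.toNat+1)))
              - cntLT s[j.toNat] ((s.drop (i.toNat+1)).take (j.toNat - (i.toNat+1)))))) := by
    rw [calc_cost_eq_inv, inv_swap, ← decomp s i.toNat j.toNat hab hbs]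
  rw [hc1, hmm]
  have hTlen : (s.take i.toNat ++ (s[j.toNat]'hbs ::
      ((s.drop (i.toNat+1)).take (j.toNat - (i.toNat+1)) ++ (s[i.toNat]'(by omega) :: s.drop (j.toNat+1))))).length
      = s.length := by
    simp
    omega
  split_ifs <;>
    first
      | exact ⟨hTlen, hlen2, hbb, rfl⟩
      | exact ⟨hTlen, by rw [copy_into_zero _ stA'.2.1 (by rw [hlen2, hTlen]), hTlen],
          by rw [copy_into_zero _ stA'.2.1 (by rw [hlen2, hTlen])], rfl⟩
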